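-- pv_equiv track=rewrite | github.com/KohakuBlueleaf/UwUDiff | src/duwu/modules/attn_masks.py | get_descendants
-- ===== SOURCE A (Python) =====
-- def get_descendants(adjacency: list[list[int]]) -> list[list[int]]:
--     """
--     This only works for DAG
--     """
--     descendants = [None] * len(adjacency)
--
--     def dfs(node):
--         if descendants[node] is not None:
--             return descendants[node]
--         descendants[node] = set()
--         for child in adjacency[node]:
--             descendants[node].update(dfs(child))
--         descendants[node].add(node)
--         return descendants[node]
--
--     for node in range(len(adjacency)):
--         dfs(node)
--
--     descendants = [sorted(x) for x in descendants]
--     return descendants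
-- ===== SOURCE B (Python) =====
-- def get_descendants(adjacency: list[list[int]]) -> list[list[int]]:
--     """
--     This only works for DAG
--     """
--     n = len(adjacency)
--     descendants = [None] * n
--     for start in range(n):
--         stack = [("enter", start, None)]
--         while stack:
--             op, node, child = stack.pop()
--             if op == "enter":
--                 if descendants[node] is not None:
--                     continue
--                 descendants[node] = set()
--                 frames = [("finish", node, None)]
--                 for c in reversed(adjacency[node]):
--                     frames.append(("merge", node, c))
--                     frames.append(("enter", c, None))
--                 stack.extend(frames)
--             elif op == "merge":
--                 descendants[node] |= descendants[child]
--             else: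
--                 descendants[node].add(node)
--     return [sorted(x) for x in descendants]
-- ===== Notes on version B (the rewrite author's own statement) =====
-- stated objective: alternative
-- what changed: The recursive memoized DFS (nested closure mutating the memo list) is replaced by an explicit two-phase stack machine with enter/merge/finish frames, eliminating recursion while performing the identical sequence of set updates.
import Mathlib
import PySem

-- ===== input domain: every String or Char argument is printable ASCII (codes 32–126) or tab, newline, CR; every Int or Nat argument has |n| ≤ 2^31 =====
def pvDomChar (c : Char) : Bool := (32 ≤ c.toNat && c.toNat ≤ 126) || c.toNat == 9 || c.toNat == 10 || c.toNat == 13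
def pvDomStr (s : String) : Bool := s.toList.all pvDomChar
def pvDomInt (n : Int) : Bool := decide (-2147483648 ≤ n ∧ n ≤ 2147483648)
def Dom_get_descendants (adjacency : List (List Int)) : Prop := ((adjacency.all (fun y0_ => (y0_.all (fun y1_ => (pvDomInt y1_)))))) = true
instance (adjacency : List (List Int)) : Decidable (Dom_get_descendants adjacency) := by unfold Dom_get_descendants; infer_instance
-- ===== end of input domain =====

-- B replaces A's recursive memoized DFS with an explicit two-phase stack machine (enter/merge/finish
-- frames) that performs the identical sequence of set operations iteratively; objective: alternative
-- (same asymptotic cost, no recursion).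

-- ===== PORT A =====

-- State of the Python list `descendants`: one Option (set of Int) per node.

-- mutate `descendants[i]` in place when it holds a set (both Pythons only do this on set entries)
def pvModify (d : List (Option (List Int))) (i : Int) (f : List Int → List Int) :
    List (Option (List Int)) :=
  match PySem.List.pyGet? d i with
  | some (some s) => PySem.List.pySetD d i (some (f s))
  | _ => d

-- number of still-unvisited (None) entries; the recursion/stack measure
def pvCN (d : List (Option (List Int))) : Nat := d.countP (fun o => o.isNone)

-- the recursive dfs of A, with a fuel bound on recursion depth (pvCN d + 1 always suffices;
-- A's caller passes length+1): a totality guard only, never exhausted on inputs in Pre_.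
def pvDfs (adjacency : List (List Int)) :
    Nat → List (Option (List Int)) → Int → (List (Option (List Int)) × List Int)
  | 0, d, _ => (d, [])
  | fuel+1, d, node =>
    match PySem.List.pyGet? d node with
    | none => (d, [])                    -- IndexError (outside Pre_)
    | some (some s) => (d, s)            -- memo hit: `descendants[node] is not None`
    | some none =>
      let d1 := PySem.List.pySetD d node (some [])            -- descendants[node] = set()
      let row := (PySem.List.pyGet? adjacency node).getD []   -- adjacency[node]
      let d2 := row.foldl (fun dd c =>
        pvModify (pvDfs adjacency fuel dd c).1 node
          (fun s => PySem.Set.update s (pvDfs adjacency fuel dd c).2)) d1   -- descendants[node].update(dfs(child))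
      let d3 := pvModify d2 node (fun s => PySem.Set.add s node)  -- descendants[node].add(node)
      (d3, (((PySem.List.pyGet? d3 node).getD none).getD []))    -- return descendants[node]

def get_descendants (adjacency : List (List Int)) : List (List Int) :=
  let n := adjacency.length
  let d := (PySem.List.pyRange 0 (n : Int) 1).foldl
      (fun d node => (pvDfs adjacency (n + 1) d node).1) (List.replicate n none)
  d.map (fun o => PySem.List.sorted (o.getD []) (fun x => x) false)

-- ===== PORT B =====

inductive PVFrame where
  | enter  : Int → PVFrame
  | merge  : Int → Int → PVFrame
  | fin    : Int → PVFrame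
deriving DecidableEq, Repr

-- termination lemmas for the stack machine (cited by pvRun's decreasing_by)
theorem pvIdx_lt {n : Nat} {i : Int} {k : Nat} (h : PySem.List.pyIdx? n i = some k) : k < n := by
  unfold PySem.List.pyIdx? at h
  split_ifs at h <;> simp_all <;> omega

theorem pvCN_mark {d : List (Option (List Int))} {i : Int} {v : List Int}
    (h : PySem.List.pyGet? d i = some none) :
    pvCN (PySem.List.pySetD d i (some v)) + 1 = pvCN d := by
  unfold PySem.List.pyGet? at h
  cases hk : PySem.List.pyIdx? d.length i with
  | none => simp [hk] at h
  | some k =>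
    have hlt : k < d.length := pvIdx_lt hk
    rw [hk] at h
    simp only [Option.bind_some] at h
    have hget : d[k]? = some none := h
    have hgetE : d[k] = none := by
      have := List.getElem?_eq_getElem hlt (l := d)
      rw [this] at hget; exact Option.some.inj hget
    unfold PySem.List.pySetD PySem.List.pySet?
    rw [hk]
    simp only [Option.map_some, Option.getD_some]
    unfold pvCN
    rw [List.countP_set hlt]
    have hpos : 0 < d.countP (fun o => o.isNone) := by
      rw [List.countP_pos_iff]
      exact ⟨none, by rw [← hgetE]; exact List.getElem_mem hlt, rfl⟩
    simp [hgetE]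
    omega

theorem pvCN_modify (d : List (Option (List Int))) (i : Int) (f : List Int → List Int) :
    pvCN (pvModify d i f) = pvCN d := by
  unfold pvModify
  cases hg : PySem.List.pyGet? d i with
  | none => rfl
  | some o =>
    cases o with
    | none => rfl
    | some s =>
      unfold PySem.List.pyGet? at hg
      cases hk : PySem.List.pyIdx? d.length i with
      | none => simp [hk] at hg
      | some k =>
        have hlt : k < d.length := pvIdx_lt hk
        rw [hk] at hg
        simp only [Option.bind_some] at hg
        have hgetE : d[k] = some s := by
          have := List.getElem?_eq_getElem hlt (l := d)
          rw [this] at hg; exact Option.some.inj hg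
        unfold PySem.List.pySetD PySem.List.pySet?
        rw [hk]
        simp only [Option.map_some, Option.getD_some]
        unfold pvCN
        rw [List.countP_set hlt]
        simp [hgetE]

-- the explicit-stack machine of B: frames are processed from the front (= top of Python's stack)
def pvRun (adjacency : List (List Int)) :
    List PVFrame → List (Option (List Int)) → List (Option (List Int))
  | [], d => d
  | .enter node :: fs, d =>
    match h : PySem.List.pyGet? d node with
    | none => pvRun adjacency fs d                 -- IndexError (outside Pre_)
    | some (some _) => pvRun adjacency fs d        -- already visited: continue
    | some none =>
      let d1 := PySem.List.pySetD d node (some [])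
      let row := (PySem.List.pyGet? adjacency node).getD []
      pvRun adjacency (row.flatMap (fun c => [.enter c, .merge node c]) ++ .fin node :: fs) d1
  | .merge p c :: fs, d =>
    let cs := ((PySem.List.pyGet? d c).getD none).getD []
    pvRun adjacency fs (pvModify d p (fun s => PySem.Set.update s cs))
  | .fin node :: fs, d =>
    pvRun adjacency fs (pvModify d node (fun s => PySem.Set.add s node))
  termination_by fs d => (pvCN d, fs.length)
  decreasing_by
  · exact Prod.Lex.right _ (by simp)
  · exact Prod.Lex.right _ (by simp)
  · exact Prod.Lex.left _ _ (by have := pvCN_mark (v := []) h; omega)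
  · rw [pvCN_modify]; exact Prod.Lex.right _ (by simp)
  · rw [pvCN_modify]; exact Prod.Lex.right _ (by simp)

def get_descendants_alt (adjacency : List (List Int)) : List (List Int) :=
  let n := adjacency.length
  let d := (PySem.List.pyRange 0 (n : Int) 1).foldl
      (fun d node => pvRun adjacency [.enter node] d) (List.replicate n none)
  d.map (fun o => PySem.List.sorted (o.getD []) (fun x => x) false)

-- ===== PRECONDITION & SPEC =====
-- Pre_ excludes exactly the inputs where some child index is out of range (< -len or >= len),
-- on which Python A raises IndexError; A returns normally on every other input.
def Pre_get_descendants (adjacency : List (List Int)) : Prop :=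
  ∀ row ∈ adjacency, ∀ c ∈ row, PySem.Raise.InRange adjacency.length c
instance (adjacency : List (List Int)) : Decidable (Pre_get_descendants adjacency) := by
  unfold Pre_get_descendants; infer_instance

def pvWitness_get_descendants : List (List Int) := [[1, 2], [2], []]

def Spec_get_descendants (adjacency : List (List Int)) (out : List (List Int)) : Prop :=
  out = get_descendants_alt adjacency
instance (adjacency : List (List Int)) (out : List (List Int)) :
    Decidable (Spec_get_descendants adjacency out) := by
  unfold Spec_get_descendants; infer_instance

-- ===== CLAIM (what is proved, stated in full; the proofs are below) =====
def Claim_equal_get_descendants : Prop :=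
  ∀ (adjacency : List (List Int)), Dom_get_descendants adjacency →
    Pre_get_descendants adjacency →
    Spec_get_descendants adjacency (get_descendants adjacency)

-- ===== LEMMAS AND PROOFS =====

theorem pvGet_pySetD_cases (d : List (Option (List Int))) (i j : Int) (v : Option (List Int)) :
    PySem.List.pyGet? (PySem.List.pySetD d i v) j = PySem.List.pyGet? d j ∨
    PySem.List.pyGet? (PySem.List.pySetD d i v) j = some v := by
  unfold PySem.List.pySetD PySem.List.pySet? PySem.List.pyGet?
  cases hk : PySem.List.pyIdx? d.length i with
  | none => simp
  | some k =>
    have hlt : k < d.length := pvIdx_lt hk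
    simp only [Option.map_some, Option.getD_some, List.length_set]
    cases hm : PySem.List.pyIdx? d.length j with
    | none => simp
    | some m =>
      have hmlt : m < d.length := pvIdx_lt hm
      simp only [Option.bind_some]
      by_cases hmk : m = k
      · subst hmk
        right
        simp [hmlt]
      · left
        rw [List.getElem?_set_ne (by omega)]

theorem pvGet_pySetD_self {d : List (Option (List Int))} {i : Int} {u : Option (List Int)}
    (v : Option (List Int)) (h : PySem.List.pyGet? d i = some u) :
    PySem.List.pyGet? (PySem.List.pySetD d i v) i = some v := by
  unfold PySem.List.pySetD PySem.List.pySet? PySem.List.pyGet? at *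
  cases hk : PySem.List.pyIdx? d.length i with
  | none => simp [hk] at h
  | some k =>
    have hlt : k < d.length := pvIdx_lt hk
    simp only [hk, Option.map_some, Option.getD_some, List.length_set, Option.bind_some]
    simp [hlt]

theorem pvLen_pySetD (d : List (Option (List Int))) (i : Int) (v : Option (List Int)) :
    (PySem.List.pySetD d i v).length = d.length := by
  unfold PySem.List.pySetD PySem.List.pySet?
  cases hk : PySem.List.pyIdx? d.length i <;> simp

theorem pvLen_modify (d : List (Option (List Int))) (i : Int) (f : List Int → List Int) :
    (pvModify d i f).length = d.length := by
  unfold pvModify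
  cases hg : PySem.List.pyGet? d i with
  | none => rfl
  | some o => cases o with
    | none => rfl
    | some s => exact pvLen_pySetD d i _

theorem pvModify_entry {d : List (Option (List Int))} (i : Int) (f : List Int → List Int)
    {j : Int} {s : List Int} (h : PySem.List.pyGet? d j = some (some s)) :
    ∃ t, PySem.List.pyGet? (pvModify d i f) j = some (some t) := by
  unfold pvModify
  cases hg : PySem.List.pyGet? d i with
  | none => exact ⟨s, h⟩
  | some o => cases o with
    | none => exact ⟨s, h⟩
    | some u =>
      rcases pvGet_pySetD_cases d i j (some (f u)) with hc | hc
      · exact ⟨s, by rw [hc, h]⟩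
      · exact ⟨f u, hc⟩

theorem pvModify_self {d : List (Option (List Int))} {i : Int} {t : List Int}
    (f : List Int → List Int) (h : PySem.List.pyGet? d i = some (some t)) :
    PySem.List.pyGet? (pvModify d i f) i = some (some (f t)) := by
  unfold pvModify
  rw [h]
  exact pvGet_pySetD_self _ h

-- generic preservation along the children fold
theorem pvFold_inv (g : List (Option (List Int)) → Int → List (Option (List Int)))
    (hlen : ∀ dd c, (g dd c).length = dd.length)
    (hcn : ∀ dd c, pvCN (g dd c) ≤ pvCN dd)
    (hent : ∀ dd c j s, PySem.List.pyGet? dd j = some (some s) →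
      ∃ t, PySem.List.pyGet? (g dd c) j = some (some t)) :
    ∀ (row : List Int) (dd : List (Option (List Int))),
      (row.foldl g dd).length = dd.length ∧ pvCN (row.foldl g dd) ≤ pvCN dd ∧
      (∀ j s, PySem.List.pyGet? dd j = some (some s) →
        ∃ t, PySem.List.pyGet? (row.foldl g dd) j = some (some t)) := by
  intro row
  induction row with
  | nil => intro dd; exact ⟨rfl, le_refl _, fun j s h => ⟨s, h⟩⟩
  | cons c cs ih =>
    intro dd
    obtain ⟨l1, c1, e1⟩ := ih (g dd c)
    refine ⟨by rw [List.foldl_cons, l1, hlen], ?_, ?_⟩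
    · rw [List.foldl_cons]; exact le_trans c1 (hcn dd c)
    · intro j s h
      obtain ⟨t, ht⟩ := hent dd c j s h
      obtain ⟨t2, ht2⟩ := e1 j t ht
      exact ⟨t2, by rw [List.foldl_cons]; exact ht2⟩

-- unfolding equations for pvDfs
theorem pvDfs_zero (adj d node) : pvDfs adj 0 d node = (d, []) := by rw [pvDfs]

theorem pvDfs_none (adj fuel) {d node} (h : PySem.List.pyGet? d node = none) :
    pvDfs adj (fuel + 1) d node = (d, []) := by
  rw [pvDfs]; split <;> simp_all

theorem pvDfs_vis (adj fuel) {d node s} (h : PySem.List.pyGet? d node = some (some s)) :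
    pvDfs adj (fuel + 1) d node = (d, s) := by
  rw [pvDfs]; split <;> simp_all

theorem pvDfs_fresh (adj fuel) {d node} (h : PySem.List.pyGet? d node = some none) :
    pvDfs adj (fuel + 1) d node =
      (let d1 := PySem.List.pySetD d node (some []);
       let row := (PySem.List.pyGet? adj node).getD [];
       let d2 := row.foldl (fun dd c =>
         pvModify (pvDfs adj fuel dd c).1 node
           (fun s => PySem.Set.update s (pvDfs adj fuel dd c).2)) d1;
       let d3 := pvModify d2 node (fun s => PySem.Set.add s node);
       (d3, (((PySem.List.pyGet? d3 node).getD none).getD []))) := by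
  rw [pvDfs]; split <;> simp_all

theorem pvDfs_inv (adjacency : List (List Int)) :
    ∀ fuel d node,
      (pvDfs adjacency fuel d node).1.length = d.length ∧
      pvCN (pvDfs adjacency fuel d node).1 ≤ pvCN d ∧
      (∀ j s, PySem.List.pyGet? d j = some (some s) →
        ∃ t, PySem.List.pyGet? (pvDfs adjacency fuel d node).1 j = some (some t)) := by
  intro fuel
  induction fuel with
  | zero =>
    intro d node
    rw [pvDfs_zero]
    exact ⟨rfl, le_refl _, fun j s h => ⟨s, h⟩⟩
  | succ fuel ih =>
    intro d node
    cases hg : PySem.List.pyGet? d node with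
    | none =>
      rw [pvDfs_none adjacency fuel hg]
      exact ⟨rfl, le_refl _, fun j s h => ⟨s, h⟩⟩
    | some o => cases o with
      | some s =>
        rw [pvDfs_vis adjacency fuel hg]
        exact ⟨rfl, le_refl _, fun j s h => ⟨s, h⟩⟩
      | none =>
        rw [pvDfs_fresh adjacency fuel hg]
        simp only []
        have hstep := pvFold_inv
          (fun dd c =>
            pvModify (pvDfs adjacency fuel dd c).1 node
              (fun s => PySem.Set.update s (pvDfs adjacency fuel dd c).2))
          (fun dd c => by
            simp only []
            rw [pvLen_modify]
            exact (ih dd c).1)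
          (fun dd c => by
            simp only []
            rw [pvCN_modify]
            exact (ih dd c).2.1)
          (fun dd c j s h => by
            simp only []
            obtain ⟨t, ht⟩ := (ih dd c).2.2 j s h
            exact pvModify_entry node _ ht)
        set d1 := PySem.List.pySetD d node (some []) with hd1
        obtain ⟨fl, fc, fe⟩ := hstep ((PySem.List.pyGet? adjacency node).getD []) d1
        have hl1 : d1.length = d.length := pvLen_pySetD d node (some [])
        have hc1 : pvCN d1 + 1 = pvCN d := pvCN_mark hg
        refine ⟨?_, ?_, ?_⟩
        · rw [pvLen_modify, fl, hl1]
        · rw [pvCN_modify]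
          omega
        · intro j s h
          have hd1j : ∃ t, PySem.List.pyGet? d1 j = some (some t) := by
            rcases pvGet_pySetD_cases d node j (some []) with hc | hc
            · exact ⟨s, by rw [hd1, hc, h]⟩
            · exact ⟨[], by rw [hd1, hc]⟩
          obtain ⟨t, ht⟩ := hd1j
          obtain ⟨t2, ht2⟩ := fe j t ht
          exact pvModify_entry node _ ht2

theorem pvDfs_cn_le (adjacency : List (List Int)) (fuel : Nat)
    (d : List (Option (List Int))) (node : Int) :
    pvCN (pvDfs adjacency fuel d node).1 ≤ pvCN d :=
  (pvDfs_inv adjacency fuel d node).2.1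

theorem pvDfs_read (adjacency : List (List Int)) :
    ∀ fuel d node, pvCN d < fuel →
      PySem.List.pyGet? (pvDfs adjacency fuel d node).1 node =
        (PySem.List.pyGet? d node).map (fun _ => some (pvDfs adjacency fuel d node).2) := by
  intro fuel d node hf
  obtain ⟨fuel, rfl⟩ : ∃ f, fuel = f + 1 := ⟨fuel - 1, by omega⟩
  cases hg : PySem.List.pyGet? d node with
  | none => rw [pvDfs_none adjacency fuel hg, hg]; rfl
  | some o => cases o with
    | some s => rw [pvDfs_vis adjacency fuel hg, hg]; rfl
    | none =>
      rw [pvDfs_fresh adjacency fuel hg]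
      simp only [Option.map_some]
      have h1 : PySem.List.pyGet? (PySem.List.pySetD d node (some [])) node
          = some (some []) := pvGet_pySetD_self (some []) hg
      have hstep := pvFold_inv
        (fun dd c =>
          pvModify (pvDfs adjacency fuel dd c).1 node
            (fun s => PySem.Set.update s (pvDfs adjacency fuel dd c).2))
        (fun dd c => by simp only []; rw [pvLen_modify]; exact (pvDfs_inv adjacency fuel dd c).1)
        (fun dd c => by simp only []; rw [pvCN_modify]; exact (pvDfs_inv adjacency fuel dd c).2.1)
        (fun dd c j s h => by
          simp only []
          obtain ⟨t, ht⟩ := (pvDfs_inv adjacency fuel dd c).2.2 j s h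
          exact pvModify_entry node _ ht)
      obtain ⟨t, ht⟩ := (hstep ((PySem.List.pyGet? adjacency node).getD [])
          (PySem.List.pySetD d node (some []))).2.2 node [] h1
      -- the final entry at node after add-self
      have hfin : PySem.List.pyGet? (pvModify
          (((PySem.List.pyGet? adjacency node).getD []).foldl
            (fun dd c =>
              pvModify (pvDfs adjacency fuel dd c).1 node
                (fun s => PySem.Set.update s (pvDfs adjacency fuel dd c).2))
            (PySem.List.pySetD d node (some []))) node (fun s => PySem.Set.add s node)) node
          = some (some (PySem.Set.add t node)) :=
        pvModify_self _ ht
      rw [hfin]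
      rfl

theorem pvDfs_val (adjacency : List (List Int)) (fuel : Nat)
    (d : List (Option (List Int))) (node : Int) (hf : pvCN d < fuel) :
    ((PySem.List.pyGet? (pvDfs adjacency fuel d node).1 node).getD none).getD []
      = (pvDfs adjacency fuel d node).2 := by
  rw [pvDfs_read adjacency fuel d node hf]
  cases hg : PySem.List.pyGet? d node with
  | none =>
    obtain ⟨fuel, rfl⟩ : ∃ f, fuel = f + 1 := ⟨fuel - 1, by omega⟩
    rw [pvDfs_none adjacency fuel hg]
    rfl
  | some o => rfl

-- unfolding equations for pvRun
theorem pvRun_nil (adj : List (List Int)) (d : List (Option (List Int))) :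
    pvRun adj [] d = d := by rw [pvRun]

theorem pvRun_enter_none (adj : List (List Int)) {d : List (Option (List Int))} {node : Int}
    (fs : List PVFrame) (h : PySem.List.pyGet? d node = none) :
    pvRun adj (.enter node :: fs) d = pvRun adj fs d := by
  rw [pvRun]; split <;> simp_all

theorem pvRun_enter_vis (adj : List (List Int)) {d : List (Option (List Int))} {node : Int}
    {s : List Int} (fs : List PVFrame) (h : PySem.List.pyGet? d node = some (some s)) :
    pvRun adj (.enter node :: fs) d = pvRun adj fs d := by
  rw [pvRun]; split <;> simp_all

theorem pvRun_enter_fresh (adj : List (List Int)) {d : List (Option (List Int))} {node : Int}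
    (fs : List PVFrame) (h : PySem.List.pyGet? d node = some none) :
    pvRun adj (.enter node :: fs) d =
      pvRun adj (((PySem.List.pyGet? adj node).getD []).flatMap
          (fun c => [.enter c, .merge node c]) ++ .fin node :: fs)
        (PySem.List.pySetD d node (some [])) := by
  rw [pvRun]; split <;> simp_all

theorem pvRun_merge (adj : List (List Int)) (p c : Int) (fs : List PVFrame)
    (d : List (Option (List Int))) :
    pvRun adj (.merge p c :: fs) d =
      pvRun adj fs (pvModify d p (fun s =>
        PySem.Set.update s (((PySem.List.pyGet? d c).getD none).getD []))) := by
  rw [pvRun]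

theorem pvRun_fin (adj : List (List Int)) (node : Int) (fs : List PVFrame)
    (d : List (Option (List Int))) :
    pvRun adj (.fin node :: fs) d =
      pvRun adj fs (pvModify d node (fun s => PySem.Set.add s node)) := by
  rw [pvRun]

-- the simulation: one `enter` frame computes exactly A's dfs
theorem pvRun_enter (adjacency : List (List Int)) :
    ∀ fuel d node fs, pvCN d < fuel →
      pvRun adjacency (.enter node :: fs) d =
        pvRun adjacency fs (pvDfs adjacency fuel d node).1 := by
  intro fuel
  induction fuel with
  | zero => intro d node fs h; omega
  | succ fuel ih =>
    intro d node fs h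
    cases hg : PySem.List.pyGet? d node with
    | none =>
      rw [pvRun_enter_none adjacency fs hg, pvDfs_none adjacency fuel hg]
    | some o => cases o with
      | some s =>
        rw [pvRun_enter_vis adjacency fs hg, pvDfs_vis adjacency fuel hg]
      | none =>
        rw [pvRun_enter_fresh adjacency fs hg, pvDfs_fresh adjacency fuel hg]
        simp only []
        have hc1 : pvCN (PySem.List.pySetD d node (some [])) < fuel := by
          have := pvCN_mark (v := []) hg; omega
        have hrow : ∀ (cs : List Int) (dd : List (Option (List Int))) (fs' : List PVFrame),
            pvCN dd < fuel →
            pvRun adjacency (cs.flatMap (fun c => [.enter c, .merge node c]) ++ fs') dd =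
              pvRun adjacency fs' (cs.foldl
                (fun dd c =>
                  pvModify (pvDfs adjacency fuel dd c).1 node
                    (fun s => PySem.Set.update s (pvDfs adjacency fuel dd c).2)) dd) := by
          intro cs
          induction cs with
          | nil => intro dd fs' _; rfl
          | cons c cs ihc =>
            intro dd fs' hdd
            simp only [List.flatMap_cons, List.cons_append, List.nil_append, List.foldl_cons]
            rw [ih dd c _ hdd]
            rw [pvRun_merge]
            rw [pvDfs_val adjacency fuel dd c hdd]
            have hcn' : pvCN (pvModify (pvDfs adjacency fuel dd c).1 node
                (fun s => PySem.Set.update s (pvDfs adjacency fuel dd c).2)) < fuel := by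
              rw [pvCN_modify]
              exact lt_of_le_of_lt (pvDfs_cn_le adjacency fuel dd c) hdd
            exact ihc _ _ hcn'
        rw [hrow _ _ _ hc1]
        rw [pvRun_fin]

theorem pvCN_le_len (d : List (Option (List Int))) : pvCN d ≤ d.length :=
  List.countP_le_length

theorem pvFoldTop_eq (adjacency : List (List Int)) :
    ∀ (xs : List Int) (d : List (Option (List Int))), d.length = adjacency.length →
      xs.foldl (fun d node => pvRun adjacency [.enter node] d) d =
        xs.foldl (fun d node => (pvDfs adjacency (adjacency.length + 1) d node).1) d := by
  intro xs
  induction xs with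
  | nil => intro d _; rfl
  | cons x xs ih =>
    intro d hd
    simp only [List.foldl_cons]
    have hcn : pvCN d < adjacency.length + 1 := by
      have := pvCN_le_len d; omega
    rw [pvRun_enter adjacency (adjacency.length + 1) d x [] hcn, pvRun_nil]
    exact ih _ (by rw [(pvDfs_inv adjacency (adjacency.length + 1) d x).1, hd])

-- ===== VERDICT (by name: the statement is the Claim_ definition above) =====
theorem get_descendants_spec : Claim_equal_get_descendants := by
  intro adjacency _ _
  unfold Spec_get_descendants get_descendants get_descendants_alt
  simp only []
  rw [pvFoldTop_eq adjacency _ _ (by simp)]
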